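-- pv_equiv track=rewrite | github.com/RivenKid69/crm-sales-bot-fork | knowledge_extractor/knowledge_extractor/parsers/messenger_parser.py | _group_threads
-- ===== SOURCE A (Python) =====
-- from typing import List, Tuple
--
-- def _group_threads(
--
--     messages: List[dict],
--     gap_minutes: int = 60,
-- ) -> List[List[dict]]:
--     """Group messages into conversation threads by time gaps."""
--     if not messages:
--         return []
--
--     threads = []
--     current_thread = [messages[0]]
--
--     for msg in messages[1:]:
--         # Simple grouping: start new thread if sender pattern repeats
--         # Or if no timestamps, group by 10-20 messages
--         if len(current_thread) >= 20:
--             threads.append(current_thread)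
--             current_thread = []
--
--         current_thread.append(msg)
--
--     if current_thread:
--         threads.append(current_thread)
--
--     return threads
-- ===== SOURCE B (Python) =====
-- def _group_threads(messages, gap_minutes=60):
--     """Group messages into conversation threads by time gaps."""
--     if not messages:
--         return []
--     return [messages[:20]] + _group_threads(messages[20:], gap_minutes)
-- ===== Notes on version B (the rewrite author's own statement) =====
-- stated objective: simpler
-- what changed: Replaced the accumulator loop (current_thread/threads with flush-at-20 and a trailing flush) by a two-line structural recursion: emit messages[:20] and recurse on messages[20:].
import Mathlib
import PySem

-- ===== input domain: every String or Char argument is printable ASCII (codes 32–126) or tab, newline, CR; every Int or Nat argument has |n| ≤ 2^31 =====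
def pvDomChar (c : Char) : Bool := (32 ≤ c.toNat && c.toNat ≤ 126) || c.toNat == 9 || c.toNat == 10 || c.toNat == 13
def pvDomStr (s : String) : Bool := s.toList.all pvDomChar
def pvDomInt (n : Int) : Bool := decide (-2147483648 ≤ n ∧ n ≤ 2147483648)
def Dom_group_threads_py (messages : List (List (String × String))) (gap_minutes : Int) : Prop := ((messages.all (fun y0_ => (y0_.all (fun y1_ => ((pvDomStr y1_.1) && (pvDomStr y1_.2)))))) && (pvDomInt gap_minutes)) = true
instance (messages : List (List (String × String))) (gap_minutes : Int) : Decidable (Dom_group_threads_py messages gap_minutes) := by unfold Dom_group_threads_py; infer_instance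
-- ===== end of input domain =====

-- B replaces A's accumulator loop (flush current_thread at 20, trailing flush) by a
-- two-line structural recursion on slices; objective: simpler. gap_minutes is unused in both.

-- ===== PORT A =====
-- literal transliteration of A's accumulator loop over messages[1:]
def group_threads_py (messages : List (List (String × String))) (gap_minutes : Int) : List (List (List (String × String))) :=
  match messages with
  | [] => []
  | m0 :: _ =>
    let st := (PySem.List.slice messages (some 1) none).foldl
      (fun (st : List (List (List (String × String))) × List (List (String × String))) msg =>
        let st := if st.2.length ≥ 20 then (st.1 ++ [st.2], ([] : List (List (String × String)))) else st
        (st.1, st.2 ++ [msg]))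
      ([], [m0])
    if st.2 ≠ [] then st.1 ++ [st.2] else st.1

-- ===== PORT B =====
-- literal transliteration of Source B: [messages[:20]] + recurse on messages[20:]
def group_threads_py_alt (messages : List (List (String × String))) (gap_minutes : Int) : List (List (List (String × String))) :=
  if h : messages = [] then []
  else [PySem.List.slice messages none (some 20)] ++
       group_threads_py_alt (PySem.List.slice messages (some 20) none) gap_minutes
termination_by messages.length
decreasing_by
  have hp : 0 < messages.length := List.length_pos_of_ne_nil h
  have e : PySem.List.slice messages (some (20:Int)) none = messages.drop (20:Int).toNat :=
    PySem.List.slice_from messages (by omega)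
  rw [e]
  simp
  omega

-- ===== PRECONDITION & SPEC =====
def Spec_group_threads_py (messages : List (List (String × String))) (gap_minutes : Int) (out : List (List (List (String × String)))) : Prop := out = group_threads_py_alt messages gap_minutes
instance (messages : List (List (String × String))) (gap_minutes : Int) (out : List (List (List (String × String)))) : Decidable (Spec_group_threads_py messages gap_minutes out) := by unfold Spec_group_threads_py; infer_instance

-- ===== CLAIM (what is proved, stated in full; the proofs are below) =====
def Claim_equal_group_threads_py : Prop := ∀ (messages : List (List (String × String))) (gap_minutes : Int), Dom_group_threads_py messages gap_minutes → Spec_group_threads_py messages gap_minutes (group_threads_py messages gap_minutes)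

-- ===== LEMMAS AND PROOFS =====

-- unfolding of B on an empty / nonempty list, slices rewritten to take/drop
theorem alt_nil (gap : Int) : group_threads_py_alt [] gap = [] := by
  rw [group_threads_py_alt.eq_def]; simp

theorem alt_cons (messages : List (List (String × String))) (gap : Int) (h : messages ≠ []) :
    group_threads_py_alt messages gap =
      messages.take 20 :: group_threads_py_alt (messages.drop 20) gap := by
  rw [group_threads_py_alt.eq_def]
  simp [h, PySem.List.slice_to (b := 20) (by omega), PySem.List.slice_from (a := 20) (by omega)]

-- loop invariant: running A's loop body over `rest` from state (threads, cur), with cur a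
-- nonempty partial chunk of length ≤ 20, and then flushing, yields threads ++ B (cur ++ rest)
theorem loop_chunks (gap : Int) (rest : List (List (String × String))) :
    ∀ (threads : List (List (List (String × String)))) (cur : List (List (String × String))),
    cur ≠ [] → cur.length ≤ 20 →
    (let st := rest.foldl
        (fun (st : List (List (List (String × String))) × List (List (String × String))) msg =>
          let st := if st.2.length ≥ 20 then (st.1 ++ [st.2], ([] : List (List (String × String)))) else st
          (st.1, st.2 ++ [msg]))
        (threads, cur);
      if st.2 ≠ [] then st.1 ++ [st.2] else st.1)
    = threads ++ group_threads_py_alt (cur ++ rest) gap := by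
  induction rest with
  | nil =>
    intro threads cur hne hle
    simp [hne, alt_cons cur gap hne, List.take_of_length_le hle,
      List.drop_eq_nil_of_le (by omega : cur.length ≤ 20), alt_nil]
  | cons msg rest ih =>
    intro threads cur hne hle
    by_cases h20 : cur.length ≥ 20
    · have hlen : cur.length = 20 := by omega
      have step := ih (threads ++ [cur]) [msg] (by simp) (by simp)
      simp only [List.foldl_cons, if_pos h20]
      simp only [List.nil_append] at step ⊢
      rw [step]
      have : group_threads_py_alt (cur ++ msg :: rest) gap =
          cur :: group_threads_py_alt (msg :: rest) gap := by
        rw [alt_cons _ gap (by simp [hne])]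
        rw [show (20 : ℕ) = cur.length from hlen.symm]
        simp
      rw [this]; simp
    · have step := ih threads (cur ++ [msg]) (by simp) (by simp; omega)
      simp only [List.foldl_cons, if_neg h20]
      rw [step]; simp

-- ===== VERDICT (by name: the statement is the Claim_ definition above) =====
theorem group_threads_py_spec : Claim_equal_group_threads_py := by
  intro messages gap _
  unfold Spec_group_threads_py group_threads_py
  cases messages with
  | nil => simp [alt_nil]
  | cons m0 rest =>
    have := loop_chunks gap rest [] [m0] (by simp) (by simp)
    simp only [PySem.List.slice_from_one, List.tail_cons]
    simpa using this
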